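-- pv_equiv track=rewrite | github.com/Twenty1th/advent_code_2023 | day-3/part-2.py | select_number_from_line
-- ===== SOURCE A (Python) =====
-- def select_number_from_line(line: str) -> tuple[int, int, int]:
--     numbers = []
--     start_index = None
--     end_index = 0
--     for j, i in enumerate(line):
--         if i.isdigit():
--             if start_index is None:
--                 start_index = j
--             if end_index <= j:
--                 end_index = j
--             numbers.append(i)
--             continue
--         if numbers:
--             yield int("".join(numbers)), start_index, end_index
--             numbers = []
--             start_index = None
--             end_index = 0
--     if numbers:
--         yield int("".join(numbers)), start_index, end_index
-- ===== SOURCE B (Python) =====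
-- def select_number_from_line(line: str):
--     # Two-pointer run scanner: find each maximal digit run [i, j) directly
--     # and slice it out, instead of A's per-character accumulator state machine.
--     i, n = 0, len(line)
--     while i < n:
--         if line[i].isdigit():
--             j = i + 1
--             while j < n and line[j].isdigit():
--                 j += 1
--             yield int(line[i:j]), i, j - 1
--             i = j
--         else:
--             i += 1
-- ===== Notes on version B (the rewrite author's own statement) =====
-- stated objective: simpler
-- what changed: Replaces A's per-character accumulator state machine (numbers buffer, Optional start_index, end_index max-update) with a stateless two-pointer scan that locates each maximal digit run and slices it out directly.
import Mathlib
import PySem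

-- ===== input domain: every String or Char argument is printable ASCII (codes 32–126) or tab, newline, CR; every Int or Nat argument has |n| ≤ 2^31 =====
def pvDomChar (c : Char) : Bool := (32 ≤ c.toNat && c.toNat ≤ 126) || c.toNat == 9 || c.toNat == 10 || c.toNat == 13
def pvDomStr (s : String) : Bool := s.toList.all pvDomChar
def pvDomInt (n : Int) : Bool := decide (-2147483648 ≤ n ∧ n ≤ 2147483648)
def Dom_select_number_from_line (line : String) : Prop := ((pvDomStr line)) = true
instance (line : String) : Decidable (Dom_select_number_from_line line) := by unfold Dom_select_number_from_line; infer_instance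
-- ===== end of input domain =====

-- B replaces A's per-character accumulator state machine with a two-pointer scan
-- over maximal digit runs; objective: simpler. Both are generators in Python; the
-- ports return the list of yielded triples.

-- ===== PORT A =====
-- int("".join(numbers)): numbers is always a nonempty list of digits here, so the
-- parse always succeeds; .getD 0 is never taken.
def pvAVal (numbers : List Char) : Int := (PySem.Int.ofChars? numbers).getD 0

-- the for-loop over enumerate(line), state = (numbers, start_index, end_index);
-- the trailing 'if numbers: yield …' is the base case.
def pvALoop : List (Int × Char) → List Char → Option Int → Int → List (Int × Int × Int)
  | [], numbers, start_index, end_index =>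
      if numbers.isEmpty then [] else [(pvAVal numbers, start_index.getD 0, end_index)]
  | (j, i) :: rest, numbers, start_index, end_index =>
      if PySem.Chars.isdigit i then
        pvALoop rest (numbers ++ [i])
          (match start_index with | none => some j | some s => some s)
          (if end_index ≤ j then j else end_index)
      else if numbers.isEmpty then
        pvALoop rest numbers start_index end_index
      else
        (pvAVal numbers, start_index.getD 0, end_index) :: pvALoop rest [] none 0

def select_number_from_line (line : String) : List (Int × Int × Int) :=
  pvALoop (PySem.List.enumerate line.toList 0) [] none 0

-- ===== PORT B =====
-- two-pointer scan: at a digit, take the whole maximal run line[i:j] and emit it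
def pvBGo : List Char → Int → List (Int × Int × Int)
  | [], _ => []
  | c :: rest, pos =>
    if PySem.Chars.isdigit c then
      let tw := rest.takeWhile PySem.Chars.isdigit
      ((PySem.Int.ofChars? (c :: tw)).getD 0, pos, pos + (1 + (tw.length : Int)) - 1)
        :: pvBGo (rest.dropWhile PySem.Chars.isdigit) (pos + (1 + (tw.length : Int)))
    else pvBGo rest (pos + 1)
termination_by cs _ => cs.length
decreasing_by
  · exact Nat.lt_succ_of_le (List.length_dropWhile_le _ _)
  · simp

def select_number_from_line_alt (line : String) : List (Int × Int × Int) :=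
  pvBGo line.toList 0

-- ===== PRECONDITION & SPEC =====
def Spec_select_number_from_line (line : String) (out : List (Int × Int × Int)) : Prop := out = select_number_from_line_alt line
instance (line : String) (out : List (Int × Int × Int)) : Decidable (Spec_select_number_from_line line out) := by unfold Spec_select_number_from_line; infer_instance

-- ===== CLAIM (what is proved, stated in full; the proofs are below) =====
def Claim_equal_select_number_from_line : Prop := ∀ (line : String), Dom_select_number_from_line line → Spec_select_number_from_line line (select_number_from_line line)

-- ===== LEMMAS AND PROOFS =====

-- Joint invariant, by induction on the remaining characters:
-- (fresh) from the empty-buffer state A's loop computes exactly B's scan;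
-- (mid)   mid-run (buffer nums ≠ [], start = s, end = pos - 1) A's loop emits the
--         buffer extended by the leading digit run, then behaves freshly.
theorem pvLoop_eq (cs : List Char) :
    (∀ pos : Int, 0 ≤ pos →
      pvALoop (PySem.List.enumerate cs pos) [] none 0 = pvBGo cs pos)
    ∧ (∀ (pos : Int) (nums : List Char) (s : Int), 0 ≤ pos → nums ≠ [] →
      pvALoop (PySem.List.enumerate cs pos) nums (some s) (pos - 1) =
        (pvAVal (nums ++ cs.takeWhile PySem.Chars.isdigit), s,
          pos + ((cs.takeWhile PySem.Chars.isdigit).length : Int) - 1)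
        :: pvBGo (cs.dropWhile PySem.Chars.isdigit)
            (pos + ((cs.takeWhile PySem.Chars.isdigit).length : Int))) := by
  induction cs with
  | nil =>
      constructor
      · intro pos _; simp [PySem.List.enumerate_nil, pvALoop, pvBGo]
      · intro pos nums s _ hne
        simp [PySem.List.enumerate_nil, pvALoop, pvBGo, hne]
  | cons c rest ih =>
      obtain ⟨ihF, ihM⟩ := ih
      constructor
      · intro pos hpos
        rw [PySem.List.enumerate_cons]
        by_cases hd : PySem.Chars.isdigit c
        · simp only [pvALoop, hd, if_true]
          have h0 : (if (0:Int) ≤ pos then pos else 0) = pos := by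
            simp [hpos]
          rw [h0]
          have := ihM (pos + 1) [c] pos (by omega) (by simp)
          rw [show pos + 1 - 1 = pos from by ring] at this
          rw [List.nil_append, this]
          simp only [pvBGo, hd, if_true, List.singleton_append, pvAVal]
          ring_nf
        · simp only [pvALoop, hd, if_false, List.isEmpty_nil, if_true,
            Bool.false_eq_true]
          rw [ihF (pos + 1) (by omega)]
          simp [pvBGo, hd]
      · intro pos nums s hpos hne
        rw [PySem.List.enumerate_cons]
        by_cases hd : PySem.Chars.isdigit c
        · simp only [pvALoop, hd, if_true]
          have h0 : (if pos - 1 ≤ pos then pos else pos - 1) = pos := by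
            simp [show pos - 1 ≤ pos from by omega]
          rw [h0]
          have := ihM (pos + 1) (nums ++ [c]) s (by omega) (by simp)
          rw [show pos + 1 - 1 = pos from by ring] at this
          rw [this]
          simp only [List.takeWhile_cons_of_pos hd, List.dropWhile_cons_of_pos hd,
            List.append_assoc, List.singleton_append, List.length_cons]
          push_cast
          ring_nf
        · have hne' : nums.isEmpty = false := by
            cases nums with
            | nil => exact absurd rfl hne
            | cons a l => rfl
          simp only [pvALoop, hd, if_false, hne', Bool.false_eq_true]
          rw [ihF (pos + 1) (by omega)]
          simp only [List.takeWhile_cons_of_neg hd, List.dropWhile_cons_of_neg hd,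
            List.length_nil, List.append_nil, Nat.cast_zero, add_zero]
          simp [pvBGo, hd]

-- ===== VERDICT (by name: the statement is the Claim_ definition above) =====
theorem select_number_from_line_spec : Claim_equal_select_number_from_line := by
  intro line _
  unfold Spec_select_number_from_line select_number_from_line select_number_from_line_alt
  exact (pvLoop_eq line.toList).1 0 le_rfl
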